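-- pv_equiv track=rewrite | github.com/VAICR7BHAV/Competitive_Programming | ANDSQR_TEST.py | cal_bit_and
-- ===== SOURCE A (Python) =====
-- def cal_bit_and(arr):
--     And=arr[0]
--     if(len(arr)==1):
--         return And
--     else:
--         for i in range(1,len(arr)):
--             And=And & arr[i]
--         return And
-- ===== SOURCE B (Python) =====
-- def cal_bit_and(arr):
--     # pairwise (tree) reduction: repeatedly AND adjacent pairs until one value remains
--     xs = list(arr)
--     while len(xs) > 1:
--         nxt = []
--         for i in range(0, len(xs) - 1, 2):
--             nxt.append(xs[i] & xs[i + 1])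
--         if len(xs) % 2:
--             nxt.append(xs[-1])
--         xs = nxt
--     return xs[0]
-- ===== Notes on version B (the rewrite author's own statement) =====
-- stated objective: alternative
-- what changed: Replaces the left-to-right accumulator loop by a pairwise tree reduction that repeatedly ANDs adjacent pairs until one value remains.
-- outside the precondition, e.g. on cal_bit_and([]): A raises IndexError, B raises IndexError
import Mathlib
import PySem

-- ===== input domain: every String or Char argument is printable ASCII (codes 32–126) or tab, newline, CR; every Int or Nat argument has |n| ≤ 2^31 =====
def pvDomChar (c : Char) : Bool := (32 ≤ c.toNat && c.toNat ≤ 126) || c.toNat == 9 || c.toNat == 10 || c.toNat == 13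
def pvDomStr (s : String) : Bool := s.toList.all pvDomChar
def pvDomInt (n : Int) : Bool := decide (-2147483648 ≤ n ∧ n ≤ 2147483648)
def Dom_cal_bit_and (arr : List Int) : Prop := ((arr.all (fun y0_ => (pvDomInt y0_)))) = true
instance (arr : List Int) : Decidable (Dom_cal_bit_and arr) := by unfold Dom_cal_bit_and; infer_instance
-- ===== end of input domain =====

-- B replaces A's left-to-right accumulator loop by a pairwise tree reduction (alternative structure, same cost).


-- ===== PORT A =====
def cal_bit_and (arr : List Int) : Int :=
  let And := PySem.List.pyGetD arr 0 0
  if arr.length == 1 then And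
  else (PySem.List.pyRange 1 (arr.length : Int) 1).foldl
        (fun a i => PySem.Int.band a (PySem.List.pyGetD arr i 0)) And

-- ===== PORT B =====
-- one pass of Source B's inner loop: AND adjacent pairs, keep a trailing odd element
def pvPairAnd : List Int → List Int
  | [] => []
  | [x] => [x]
  | x :: y :: t => PySem.Int.band x y :: pvPairAnd t

theorem pvPairAnd_length_lt : ∀ (xs : List Int), 1 < xs.length → (pvPairAnd xs).length < xs.length
  | [], h => by simp at h
  | [_], h => by simp at h
  | x :: y :: t, _ => by
    cases t with
    | nil => simp [pvPairAnd]
    | cons a t' =>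
      cases t' with
      | nil => simp [pvPairAnd]
      | cons b t'' =>
        have := pvPairAnd_length_lt (a :: b :: t'') (by simp)
        simp only [pvPairAnd, List.length_cons] at *
        omega

-- the while-loop of Source B
def pvTreeLoop (xs : List Int) : List Int :=
  if h : 1 < xs.length then pvTreeLoop (pvPairAnd xs) else xs
termination_by xs.length
decreasing_by exact pvPairAnd_length_lt xs h

def cal_bit_and_alt (arr : List Int) : Int :=
  PySem.List.pyGetD (pvTreeLoop arr) 0 0

-- ===== PRECONDITION & SPEC =====
-- Pre_ excludes only the empty list, on which both A and B raise IndexError.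
def Pre_cal_bit_and (arr : List Int) : Prop := arr ≠ []
instance (arr : List Int) : Decidable (Pre_cal_bit_and arr) := by unfold Pre_cal_bit_and; infer_instance
def pvWitness_cal_bit_and : List Int := ([12, 10, 6])
def Spec_cal_bit_and (arr : List Int) (out : Int) : Prop := out = cal_bit_and_alt arr
instance (arr : List Int) (out : Int) : Decidable (Spec_cal_bit_and arr out) := by unfold Spec_cal_bit_and; infer_instance

-- ===== CLAIM (what is proved, stated in full; the proofs are below) =====
def Claim_equal_cal_bit_and : Prop := ∀ (arr : List Int), Dom_cal_bit_and arr → Pre_cal_bit_and arr → Spec_cal_bit_and arr (cal_bit_and arr)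

-- ===== LEMMAS AND PROOFS =====

-- Nat: removing the common bits of x and m is exactly ldiff x m
theorem pv_sub_and_eq_ldiff (x : Nat) : ∀ m : Nat, x - (x &&& m) = Nat.ldiff x m := by
  induction x using Nat.strongRecOn with
  | ind x IH =>
    intro m
    rcases Nat.eq_zero_or_pos x with hx | hx
    · subst hx
      have : (0 : Nat).ldiff m = 0 := by
        apply Nat.zero_of_testBit_eq_false
        intro i; simp [Nat.testBit_ldiff]
      simp [this]
    · have hxd : x / 2 < x := Nat.div_lt_self hx (by norm_num)
      have hbx : Nat.bit (x.testBit 0) (x / 2) = x := by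
        simpa [Nat.shiftRight_one] using Nat.bit_testBit_zero_shiftRight_one (n := x)
      have hbm : Nat.bit (m.testBit 0) (m / 2) = m := by
        simpa [Nat.shiftRight_one] using Nat.bit_testBit_zero_shiftRight_one (n := m)
      have hland : x &&& m = Nat.bit (x.testBit 0 && m.testBit 0) (x / 2 &&& m / 2) := by
        conv_lhs => rw [← hbx, ← hbm]
        exact Nat.land_bit _ _ _ _
      have hldiff : Nat.ldiff x m = Nat.bit (x.testBit 0 && !(m.testBit 0)) (Nat.ldiff (x / 2) (m / 2)) := by
        conv_lhs => rw [← hbx, ← hbm]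
        exact Nat.ldiff_bit _ _ _ _
      have hsub : x / 2 &&& m / 2 ≤ x / 2 := Nat.and_le_left
      have IH2 := IH (x / 2) hxd (m / 2)
      rw [hland, hldiff]
      nth_rewrite 1 [← hbx]
      cases hxb : x.testBit 0 <;> cases m.testBit 0 <;>
        simp only [Nat.bit, Bool.and_true, Bool.and_false, Bool.not_true, Bool.not_false,
          Bool.cond_true, Bool.cond_false] <;> omega

-- the Python bit function of an Int (two's complement, infinitely extended)
def pvTb (a : Int) (k : Nat) : Bool :=
  if 0 ≤ a then a.toNat.testBit k else !((-a - 1).toNat.testBit k)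

theorem pvTb_band (a b : Int) (k : Nat) : pvTb (PySem.Int.band a b) k = (pvTb a k && pvTb b k) := by
  unfold PySem.Int.band pvTb
  by_cases ha : 0 ≤ a <;> by_cases hb : 0 ≤ b <;> simp only [ha, hb, if_true, if_false]
  · have h1 : (0:Int) ≤ ((a.toNat &&& b.toNat : Nat) : Int) := Int.natCast_nonneg _
    simp [h1]
  · have h1 : (0:Int) ≤ ((a.toNat - (a.toNat &&& (-b - 1).toNat) : Nat) : Int) := Int.natCast_nonneg _
    simp only [h1, if_true, Int.toNat_natCast]
    rw [pv_sub_and_eq_ldiff, Nat.testBit_ldiff]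
  · have h1 : (0:Int) ≤ ((b.toNat - (b.toNat &&& (-a - 1).toNat) : Nat) : Int) := Int.natCast_nonneg _
    simp only [h1, if_true, Int.toNat_natCast]
    rw [pv_sub_and_eq_ldiff, Nat.testBit_ldiff, Bool.and_comm]
  · have h1 : ¬ (0:Int) ≤ -(((-a - 1).toNat ||| (-b - 1).toNat : Nat) : Int) - 1 := by
      have := Int.natCast_nonneg ((-a - 1).toNat ||| (-b - 1).toNat); omega
    have h2 : (-(-(((-a - 1).toNat ||| (-b - 1).toNat : Nat) : Int) - 1) - 1).toNat
        = ((-a - 1).toNat ||| (-b - 1).toNat) := by omega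
    simp only [h1, if_false, h2]
    simp

theorem pv_eq_of_tb_eq (a b : Int) (h : ∀ k, pvTb a k = pvTb b k) : a = b := by
  unfold pvTb at h
  by_cases ha : 0 ≤ a <;> by_cases hb : 0 ≤ b
  · have := Nat.eq_of_testBit_eq (x := a.toNat) (y := b.toNat) (by intro k; simpa [ha, hb] using h k)
    omega
  · exfalso
    have hk := h (a.toNat + (-b - 1).toNat)
    simp only [ha, hb, if_true, if_false] at hk
    rw [Nat.testBit_eq_false_of_lt (n := a.toNat), Nat.testBit_eq_false_of_lt (n := (-b - 1).toNat)] at hk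
    · simp at hk
    · calc (-b - 1).toNat < 2 ^ (-b - 1).toNat := Nat.lt_two_pow_self
        _ ≤ _ := Nat.pow_le_pow_right (by norm_num) (by omega)
    · calc a.toNat < 2 ^ a.toNat := Nat.lt_two_pow_self
        _ ≤ _ := Nat.pow_le_pow_right (by norm_num) (by omega)
  · exfalso
    have hk := h (b.toNat + (-a - 1).toNat)
    simp only [ha, hb, if_true, if_false] at hk
    rw [Nat.testBit_eq_false_of_lt (n := b.toNat), Nat.testBit_eq_false_of_lt (n := (-a - 1).toNat)] at hk
    · simp at hk
    · calc (-a - 1).toNat < 2 ^ (-a - 1).toNat := Nat.lt_two_pow_self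
        _ ≤ _ := Nat.pow_le_pow_right (by norm_num) (by omega)
    · calc b.toNat < 2 ^ b.toNat := Nat.lt_two_pow_self
        _ ≤ _ := Nat.pow_le_pow_right (by norm_num) (by omega)
  · have := Nat.eq_of_testBit_eq (x := (-a - 1).toNat) (y := (-b - 1).toNat)
      (by intro k; have := h k; simp only [ha, hb, if_false] at this; simpa using this)
    omega

theorem pv_band_assoc (a b c : Int) :
    PySem.Int.band (PySem.Int.band a b) c = PySem.Int.band a (PySem.Int.band b c) := by
  apply pv_eq_of_tb_eq
  intro k
  simp [pvTb_band, Bool.and_assoc]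

theorem pv_band_neg_one_left (a : Int) : PySem.Int.band (-1) a = a := by
  rw [PySem.Int.band_comm]; exact PySem.Int.band_neg_one a

theorem foldl_band_pvPairAnd : ∀ (t : List Int) (a : Int),
    (pvPairAnd t).foldl PySem.Int.band a = t.foldl PySem.Int.band a
  | [], _ => rfl
  | [_], _ => rfl
  | x :: y :: t, a => by
    simp only [pvPairAnd, List.foldl_cons]
    rw [foldl_band_pvPairAnd t, ← pv_band_assoc]

theorem pvPairAnd_ne_nil (xs : List Int) (h : xs ≠ []) : pvPairAnd xs ≠ [] := by
  match xs with
  | [] => exact absurd rfl h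
  | [_] => simp [pvPairAnd]
  | _ :: _ :: _ => simp [pvPairAnd]

theorem pvTreeLoop_eq : ∀ (xs : List Int), xs ≠ [] →
    pvTreeLoop xs = [xs.foldl PySem.Int.band (-1)]
  | xs, h => by
    rw [pvTreeLoop]
    split
    · next h1 =>
      have := pvPairAnd_length_lt xs h1
      rw [pvTreeLoop_eq (pvPairAnd xs) (pvPairAnd_ne_nil xs h), foldl_band_pvPairAnd]
    · next h1 =>
      match xs with
      | [x] => simp [pv_band_neg_one_left]
      | [] => exact absurd rfl h
      | _ :: _ :: _ => simp at h1
  termination_by xs => xs.length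
  decreasing_by exact pvPairAnd_length_lt _ (by assumption)

theorem cal_bit_and_alt_eq (h : Int) (t : List Int) :
    cal_bit_and_alt (h :: t) = t.foldl PySem.Int.band h := by
  unfold cal_bit_and_alt
  rw [pvTreeLoop_eq (h :: t) (by simp)]
  simp [PySem.List.pyGetD, pv_band_neg_one_left]

theorem cal_bit_and_eq (h : Int) (t : List Int) :
    cal_bit_and (h :: t) = t.foldl PySem.Int.band h := by
  unfold cal_bit_and
  by_cases h1 : (h :: t).length = 1
  · match t with
    | [] => simp [PySem.List.pyGetD]
    | _ :: _ => simp at h1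
  · simp only [h1, beq_iff_eq, if_false]
    have := PySem.List.foldl_pyRange_pyGetD (xs := h :: t) (a := 1) (d := 0)
      (f := PySem.Int.band) (init := PySem.List.pyGetD (h :: t) 0 0) (by norm_num)
    simp only [PySem.List.len_eq] at this
    rw [this]
    simp [PySem.List.pyGetD]

-- ===== VERDICT (by name: the statement is the Claim_ definition above) =====
theorem cal_bit_and_spec : Claim_equal_cal_bit_and := by
  intro arr _ hpre
  match arr with
  | [] => exact absurd rfl hpre
  | h :: t => unfold Spec_cal_bit_and; rw [cal_bit_and_eq, cal_bit_and_alt_eq]
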